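-- pv_equiv track=rewrite | github.com/tlmakinen/degen_discovery | simple_problems/remote_runs/fit_sr_component.py | split_by_punctuation
-- ===== SOURCE A (Python) =====
-- import string
--
-- def split_by_punctuation(s):
--     """
--     Convert a string into a list, where the string is split by punctuation,
--     excluding underscores or full stops.
--
--     For example, the string 'he_ll*o.w0%rl^d' becomes
--     ['he_ll', '*', 'o.w0', '%', 'rl', '^', 'd']
--
--     Args:
--         :s (str): The string to split up
--
--     Returns
--         :split_str (list[str]): The string split by punctuation
--
--     """
--     pun = string.punctuation.replace('_', '') # allow underscores in variable names
--     pun = string.punctuation.replace('.', '') # allow full stops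
--     pun = pun + ' '
--     where_pun = [i for i in range(len(s)) if s[i] in pun]
--     if len(where_pun) > 0:
--         split_str = [s[:where_pun[0]]]
--         for i in range(len(where_pun)-1):
--             split_str += [s[where_pun[i]]]
--             split_str += [s[where_pun[i]+1:where_pun[i+1]]]
--         split_str += [s[where_pun[-1]]]
--         if where_pun[-1] != len(s) - 1:
--             split_str += [s[where_pun[-1]+1:]]
--     else:
--         split_str = [s]
--
--     # Remove spaces
--     split_str = [s.strip() for s in split_str if len(s) > 0 and (not s.isspace())]
--
--     return split_str
-- ===== SOURCE B (Python) =====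
-- import string
--
-- def split_by_punctuation(s):
--     """One-pass split: accumulate the current segment, flush it and emit the
--     separator whenever a separator character is seen, then strip/filter."""
--     pun = string.punctuation.replace('.', '') + ' '
--     parts = []
--     cur = ''
--     for c in s:
--         if c in pun:
--             parts.append(cur)
--             parts.append(c)
--             cur = ''
--         else:
--             cur += c
--     parts.append(cur)
--     return [p.strip() for p in parts if len(p) > 0 and not p.isspace()]
-- ===== Notes on version B (the rewrite author's own statement) =====
-- stated objective: simpler
-- what changed: Replaces A's collect-separator-indices-then-slice construction (index list, pairwise slicing loop, special head/tail cases) with a single left-to-right pass that accumulates the current segment and flushes it at each separator, followed by the identical strip/filter.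
import Mathlib
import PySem

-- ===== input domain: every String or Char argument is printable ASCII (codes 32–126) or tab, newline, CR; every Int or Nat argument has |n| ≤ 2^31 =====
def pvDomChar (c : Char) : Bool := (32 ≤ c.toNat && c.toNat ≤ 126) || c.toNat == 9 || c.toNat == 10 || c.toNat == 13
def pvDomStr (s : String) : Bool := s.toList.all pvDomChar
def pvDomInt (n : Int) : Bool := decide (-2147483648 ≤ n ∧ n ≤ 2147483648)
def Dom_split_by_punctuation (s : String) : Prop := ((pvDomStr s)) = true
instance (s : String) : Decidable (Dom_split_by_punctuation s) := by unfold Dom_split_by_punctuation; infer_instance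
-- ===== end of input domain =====

-- B replaces A's separator-index/slicing construction with a single accumulating pass; same return value everywhere.

-- ===== PORT A =====
-- pun = string.punctuation.replace('.', '') + ' '  (the first replace('_','') is overwritten, as in A)
def pvPun : List Char := (PySem.Chars.replace "!\"#$%&'()*+,-./:;<=>?@[\\]^_`{|}~".toList ['.'] []) ++ [' ']

-- the construction of split_str before the final comprehension (A's body, on s.toList);
-- indices produced by range(len(s)) are in range, so list indexing w[i]/s[i] uses getD/pyGet?.getD
def pvRawA (cs : List Char) : List (List Char) :=
  let wp : List Nat := (List.range cs.length).filter
      (fun i => decide (((PySem.List.pyGet? cs (i : Int)).getD ' ') ∈ pvPun))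
  if 0 < wp.length then
    let first := [PySem.List.slice cs none (some ((wp.headD 0 : Nat) : Int))]
    let mid := (List.range (wp.length - 1)).foldl
      (fun acc i => acc ++ [[(PySem.List.pyGet? cs ((wp.getD i 0 : Nat) : Int)).getD ' ']]
        ++ [PySem.List.slice cs (some ((wp.getD i 0 + 1 : Nat) : Int)) (some ((wp.getD (i+1) 0 : Nat) : Int))])
      first
    let raw2 := mid ++ [[(PySem.List.pyGet? cs ((wp.getLastD 0 : Nat) : Int)).getD ' ']]
    -- here wp ≠ [] so len(s) ≥ 1 and Python's len(s)-1 is the Nat cs.length - 1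
    if wp.getLastD 0 ≠ cs.length - 1 then raw2 ++ [PySem.List.slice cs (some ((wp.getLastD 0 + 1 : Nat) : Int)) none]
    else raw2
  else [cs]

def split_by_punctuation (s : String) : List String :=
  ((pvRawA s.toList).filter (fun t => decide (0 < t.length) && !PySem.Chars.strIsspace t)).map
    (fun t => String.ofList (PySem.Chars.strip t))

-- ===== PORT B =====
def split_by_punctuation_alt (s : String) : List String :=
  let st := s.toList.foldl
    (fun (acc : List (List Char) × List Char) c =>
      if c ∈ pvPun then (acc.1 ++ [acc.2, [c]], []) else (acc.1, acc.2 ++ [c]))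
    ([], [])
  let parts := st.1 ++ [st.2]
  (parts.filter (fun t => decide (0 < t.length) && !PySem.Chars.strIsspace t)).map
    (fun t => String.ofList (PySem.Chars.strip t))

-- ===== PRECONDITION & SPEC =====
def Spec_split_by_punctuation (s : String) (out : List String) : Prop := out = split_by_punctuation_alt s
instance (s : String) (out : List String) : Decidable (Spec_split_by_punctuation s out) := by unfold Spec_split_by_punctuation; infer_instance

-- ===== CLAIM (what is proved, stated in full; the proofs are below) =====
def Claim_equal_split_by_punctuation : Prop := ∀ (s : String), Dom_split_by_punctuation s → Spec_split_by_punctuation s (split_by_punctuation s)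

-- ===== LEMMAS AND PROOFS =====

-- the chunk list both programs implicitly build: segments and single separators interleaved
def pvChunks : List Char → List (List Char)
  | [] => [[]]
  | c :: t =>
    if c ∈ pvPun then [] :: [c] :: pvChunks t
    else match pvChunks t with
      | [] => [[c]]
      | h :: r => (c :: h) :: r

def pvConsHead (cur : List Char) : List (List Char) → List (List Char)
  | [] => [cur]
  | h :: r => (cur ++ h) :: r

def pvEndSep : List Char → Bool
  | [] => false
  | [c] => decide (c ∈ pvPun)
  | _ :: c :: t => pvEndSep (c :: t)

def pvMidGo (cs : List Char) : List Nat → List (List Char)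
  | [] => []
  | [_] => []
  | i :: j :: r => [cs.getD i ' '] :: (cs.drop (i+1)).take (j - (i+1)) :: pvMidGo cs (j :: r)

def pvWp (cs : List Char) : List Nat :=
  (List.range cs.length).filter (fun i => decide (cs.getD i ' ' ∈ pvPun))

-- pvRawA with the PySem indexing/slicing primitives evaluated to drop/take/getD and the loop to pvMidGo
def pvRawC (cs : List Char) : List (List Char) :=
  match pvWp cs with
  | [] => [cs]
  | w0 :: ws =>
    let w := w0 :: ws
    let raw2 := (cs.take w0 :: pvMidGo cs w) ++ [[cs.getD (w.getLastD 0) ' ']]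
    if w.getLastD 0 ≠ cs.length - 1 then raw2 ++ [cs.drop (w.getLastD 0 + 1)] else raw2

theorem pvChunks_ne_nil (cs : List Char) : pvChunks cs ≠ [] := by
  cases cs with
  | nil => simp [pvChunks]
  | cons c t =>
    simp only [pvChunks]
    split
    · simp
    · cases h : pvChunks t <;> simp

theorem pvRawC_ne_nil (cs : List Char) : pvRawC cs ≠ [] := by
  unfold pvRawC
  rcases h : pvWp cs with _ | ⟨w0, ws⟩
  · simp
  · dsimp only
    split <;> simp

theorem pvB_fold (l : List Char) (ps : List (List Char)) (cur : List Char) :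
    (let st := l.foldl
      (fun (acc : List (List Char) × List Char) c =>
        if c ∈ pvPun then (acc.1 ++ [acc.2, [c]], []) else (acc.1, acc.2 ++ [c]))
      (ps, cur)
     st.1 ++ [st.2]) = ps ++ pvConsHead cur (pvChunks l) := by
  induction l generalizing ps cur with
  | nil => simp [pvChunks, pvConsHead]
  | cons c t ih =>
    simp only [List.foldl_cons]
    by_cases h : c ∈ pvPun
    · simp only [if_pos h]
      rw [ih]
      rcases hc : pvChunks t with _ | ⟨hd, r⟩
      · exact absurd hc (pvChunks_ne_nil t)
      · simp [pvChunks, if_pos h, hc, pvConsHead]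
    · simp only [if_neg h]
      rw [ih]
      rcases hc : pvChunks t with _ | ⟨hd, r⟩
      · exact absurd hc (pvChunks_ne_nil t)
      · simp [pvChunks, if_neg h, hc, pvConsHead]

theorem pvMid_lemma (cs : List Char) (w : List Nat) (acc : List (List Char)) :
    (List.range (w.length - 1)).foldl
      (fun acc i => acc ++ [[cs.getD (w.getD i 0) ' ']]
        ++ [(cs.drop (w.getD i 0 + 1)).take (w.getD (i+1) 0 - (w.getD i 0 + 1))]) acc
    = acc ++ pvMidGo cs w := by
  induction w generalizing acc with
  | nil => simp [pvMidGo]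
  | cons i l ih =>
    cases l with
    | nil => simp [pvMidGo]
    | cons j r =>
      simp only [List.length_cons, Nat.add_sub_cancel, List.range_succ_eq_map, List.foldl_cons,
        List.foldl_map, List.getD_cons_zero, List.getD_cons_succ, Nat.succ_eq_add_one]
      have := ih (acc := acc ++ [[cs.getD i ' ']] ++ [(cs.drop (i+1)).take (j - (i+1))])
      simp only [List.length_cons, Nat.add_sub_cancel, List.getD_cons_succ] at this
      rw [this]
      simp [pvMidGo]

theorem pvRawA_eq (cs : List Char) : pvRawA cs = pvRawC cs := by
  unfold pvRawA pvRawC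
  simp only [PySem.List.pyGet?_natCast, ← List.getD_eq_getElem?_getD, PySem.List.slice_natCast,
    PySem.List.slice_to_natCast, PySem.List.slice_from_natCast]
  have hw : (List.range cs.length).filter (fun i => decide (cs.getD i ' ' ∈ pvPun)) = pvWp cs := rfl
  rw [hw]
  rcases h : pvWp cs with _ | ⟨w0, ws⟩
  · simp
  · simp only [List.length_cons, Nat.zero_lt_succ, if_pos, List.headD_cons]
    have hm := pvMid_lemma cs (w0 :: ws) [List.take w0 cs]
    simp only [List.length_cons] at hm
    rw [hm]
    split <;> simp

theorem pvWp_lt (cs : List Char) : ∀ i ∈ pvWp cs, i < cs.length := by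
  intro i hi
  simp only [pvWp, List.mem_filter, List.mem_range] at hi
  exact hi.1

theorem pvWp_cons (c : Char) (t : List Char) :
    pvWp (c :: t) = (if c ∈ pvPun then [0] else []) ++ (pvWp t).map (· + 1) := by
  simp only [pvWp, List.length_cons, List.range_succ_eq_map, List.filter_cons, List.filter_map]
  by_cases h : c ∈ pvPun
  · simp only [h, decide_true, if_pos, List.getD_cons_zero, Function.comp_def,
      List.getD_cons_succ]
    exact congrArg (0 :: ·) (List.map_congr_left (fun x _ => rfl))
  · simp only [h, decide_false, if_neg, List.getD_cons_zero, Function.comp_def,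
      List.getD_cons_succ, Bool.false_eq_true, not_false_iff, List.nil_append]


theorem pvGetLastD_mem (w : List Nat) (h : w ≠ []) : w.getLastD 0 ∈ w := by
  induction w with
  | nil => exact absurd rfl h
  | cons a l ih =>
    cases l with
    | nil => simp
    | cons b m =>
      rw [List.getLastD_cons]
      exact List.mem_cons_of_mem _ (ih (by simp))

theorem pvGetLastD_map_succ (w : List Nat) (h : w ≠ []) :
    (w.map (· + 1)).getLastD 0 = w.getLastD 0 + 1 := by
  induction w with
  | nil => exact absurd rfl h
  | cons a l ih =>
    cases l with
    | nil => simp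
    | cons b m => simpa [List.getLastD_cons] using ih (by simp)

theorem pvMidGo_shift (c : Char) (t : List Char) (w : List Nat) :
    pvMidGo (c :: t) (w.map (· + 1)) = pvMidGo t w := by
  induction w with
  | nil => rfl
  | cons i l ih =>
    cases l with
    | nil => rfl
    | cons j r =>
      simp only [List.map_cons] at ih ⊢
      simp only [pvMidGo, ih]
      simp [Nat.add_sub_add_right]

theorem pvEndSep_cons (c : Char) (t : List Char) (h : t ≠ []) :
    pvEndSep (c :: t) = pvEndSep t := by
  cases t with
  | nil => exact absurd rfl h
  | cons b m => rfl

theorem pvRawC_cons_nonsep (c : Char) (t : List Char) (h : c ∉ pvPun) :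
    pvRawC (c :: t) = pvConsHead [c] (pvRawC t) := by
  unfold pvRawC
  rw [pvWp_cons]
  simp only [h, if_neg, not_false_iff, List.nil_append]
  rcases hw : pvWp t with _ | ⟨w0, ws⟩
  · simp [pvConsHead]
  · simp only [List.map_cons]
    have hlt : (w0 :: ws).getLastD 0 < t.length :=
      pvWp_lt t _ (hw ▸ pvGetLastD_mem (w0 :: ws) (by simp))
    have hshift := pvMidGo_shift c t (w0 :: ws)
    have hlast := pvGetLastD_map_succ (w0 :: ws) (by simp)
    simp only [List.map_cons] at hshift hlast
    simp only [hshift, hlast, List.take_succ_cons, List.getD_cons_succ, List.length_cons,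
      Nat.add_sub_cancel, List.drop_succ_cons]
    split_ifs with h1 h2 h2
    · simp [pvConsHead]
    · omega
    · omega
    · simp [pvConsHead]

theorem pvRawC_cons_sep (c : Char) (t : List Char) (h : c ∈ pvPun) (ht : t ≠ []) :
    pvRawC (c :: t) = [] :: [c] :: pvRawC t := by
  unfold pvRawC
  rw [pvWp_cons]
  simp only [h, if_pos, List.singleton_append]
  rcases hw : pvWp t with _ | ⟨w0, ws⟩
  · -- no separators in t: pvRawC (c::t) evaluates with wp = [0]
    simp only [List.map_nil]
    have hlen : 0 < t.length := List.length_pos_of_ne_nil ht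
    simp only [pvMidGo, List.take_zero, List.getD_cons_zero, List.getLastD_cons,
      List.getLastD_nil, List.length_cons, Nat.add_sub_cancel, List.drop_succ_cons,
      List.drop_zero]
    split_ifs with h1
    · simp
    · omega
  · simp only [List.map_cons]
    have hlt : (w0 :: ws).getLastD 0 < t.length :=
      pvWp_lt t _ (hw ▸ pvGetLastD_mem (w0 :: ws) (by simp))
    have hshift := pvMidGo_shift c t (w0 :: ws)
    have hlast := pvGetLastD_map_succ (w0 :: ws) (by simp)
    simp only [List.map_cons] at hshift hlast
    simp only [pvMidGo, List.getLastD_cons, hshift, hlast, List.take_zero,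
      List.getD_cons_zero, List.getD_cons_succ, List.length_cons, Nat.add_sub_cancel,
      List.drop_succ_cons]
    split_ifs with h1 h2 h2
    · simp
    · omega
    · omega
    · simp

theorem pvConsHead_append (cur : List Char) (l m : List (List Char)) (h : l ≠ []) :
    pvConsHead cur (l ++ m) = pvConsHead cur l ++ m := by
  cases l with
  | nil => exact absurd rfl h
  | cons a r => simp [pvConsHead]

theorem pvConsHead_nil (l : List (List Char)) (h : l ≠ []) : pvConsHead [] l = l := by
  cases l with
  | nil => exact absurd rfl h
  | cons a r => simp [pvConsHead]

theorem pvMain (cs : List Char) :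
    pvChunks cs = pvRawC cs ++ (if pvEndSep cs then [[]] else []) := by
  induction cs with
  | nil => simp [pvChunks, pvRawC, pvWp, pvEndSep]
  | cons c t ih =>
    by_cases h : c ∈ pvPun
    · cases t with
      | nil =>
        simp [pvChunks, pvRawC, pvWp, pvEndSep, pvMidGo, h, List.range_succ]
      | cons b m =>
        rw [pvRawC_cons_sep c (b :: m) h (by simp), pvEndSep_cons c (b :: m) (by simp)]
        have hch : pvChunks (c :: b :: m) = [] :: [c] :: pvChunks (b :: m) := by
          simp [pvChunks, h]
        rw [hch, ih]
        simp
    · rw [pvRawC_cons_nonsep c t h]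
      have hend : pvEndSep (c :: t) = pvEndSep t := by
        cases t with
        | nil => simp [pvEndSep, h]
        | cons b m => rfl
      rw [hend]
      rcases hc : pvChunks t with _ | ⟨hd, r⟩
      · exact absurd hc (pvChunks_ne_nil t)
      · simp only [pvChunks, h, if_neg, hc, not_false_iff]
        have hthis := ih
        rw [hc] at hthis
        rw [← pvConsHead_append _ _ _ (pvRawC_ne_nil t), ← hthis]
        simp [pvConsHead]

-- ===== VERDICT (by name: the statement is the Claim_ definition above) =====
theorem split_by_punctuation_spec : Claim_equal_split_by_punctuation := by
  intro s _
  unfold Spec_split_by_punctuation split_by_punctuation split_by_punctuation_alt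
  have hb := pvB_fold s.toList [] []
  simp only at hb
  simp only []
  rw [hb, List.nil_append, pvConsHead_nil _ (pvChunks_ne_nil s.toList),
    pvRawA_eq, pvMain s.toList, List.filter_append]
  have hnil : List.filter (fun t => decide (0 < t.length) && !PySem.Chars.strIsspace t)
      (if pvEndSep s.toList then [([] : List Char)] else []) = [] := by
    split <;> simp [PySem.Chars.strIsspace]
  rw [hnil, List.append_nil]
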